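-- pv_equiv track=rewrite | github.com/chuanran/hackerrank_prep | python/sets/no-idea/python3.py | cal_happiness
-- ===== SOURCE A (Python) =====
-- def cal_happiness(arr, seta, setb):
--     happiness = 0
--     for arr_elem in arr:
--         if arr_elem in seta:
--             happiness += 1
--         if arr_elem in setb:
--             happiness -= 1
--     return happiness
-- ===== SOURCE B (Python) =====
-- def cal_happiness(arr, seta, setb):
--     counts = {}
--     for x in arr:
--         counts[x] = counts.get(x, 0) + 1
--     return sum(counts.get(s, 0) for s in set(seta)) - sum(counts.get(s, 0) for s in set(setb))
-- ===== Notes on version B (the rewrite author's own statement) =====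
-- stated objective: alternative
-- what changed: B inverts the traversal: it builds a frequency table of arr once and then sums the stored counts over the distinct elements of seta and setb, instead of scanning arr and testing list membership per element.
import Mathlib
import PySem

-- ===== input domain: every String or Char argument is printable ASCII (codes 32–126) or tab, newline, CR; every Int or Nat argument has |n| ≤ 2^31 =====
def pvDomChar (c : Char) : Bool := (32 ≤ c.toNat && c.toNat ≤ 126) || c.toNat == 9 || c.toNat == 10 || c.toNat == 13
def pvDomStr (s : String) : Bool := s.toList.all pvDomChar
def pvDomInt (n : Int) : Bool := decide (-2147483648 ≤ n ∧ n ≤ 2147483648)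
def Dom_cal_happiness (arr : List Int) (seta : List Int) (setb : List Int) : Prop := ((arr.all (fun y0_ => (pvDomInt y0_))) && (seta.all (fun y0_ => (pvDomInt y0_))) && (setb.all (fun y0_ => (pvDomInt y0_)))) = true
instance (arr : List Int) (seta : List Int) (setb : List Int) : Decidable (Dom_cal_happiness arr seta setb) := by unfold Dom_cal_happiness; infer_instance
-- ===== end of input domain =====

-- B builds a frequency table of arr once and sums the counts over the distinct elements of seta
-- and of setb and returns the difference (alternative decomposition, same result).


-- ===== PORT A =====
def cal_happiness (arr : List Int) (seta : List Int) (setb : List Int) : Int :=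
  arr.foldl (fun happiness arr_elem =>
    let h1 := if seta.contains arr_elem then happiness + 1 else happiness
    if setb.contains arr_elem then h1 - 1 else h1) 0

-- ===== PORT B =====
def cal_happiness_alt (arr : List Int) (seta : List Int) (setb : List Int) : Int :=
  let counts : PySem.Dict Int Int :=
    arr.foldl (fun d x => d.insert x (d.getD x 0 + 1)) PySem.Dict.empty
  ((PySem.Set.ofList seta).map (fun s => counts.getD s 0)).sum
    - ((PySem.Set.ofList setb).map (fun s => counts.getD s 0)).sum

-- ===== PRECONDITION & SPEC =====
def Spec_cal_happiness (arr : List Int) (seta : List Int) (setb : List Int) (out : Int) : Prop := out = cal_happiness_alt arr seta setb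
instance (arr : List Int) (seta : List Int) (setb : List Int) (out : Int) : Decidable (Spec_cal_happiness arr seta setb out) := by unfold Spec_cal_happiness; infer_instance

-- ===== CLAIM =====
def Claim_equal_cal_happiness : Prop := ∀ (arr : List Int) (seta : List Int) (setb : List Int), Dom_cal_happiness arr seta setb → Spec_cal_happiness arr seta setb (cal_happiness arr seta setb)

-- ===== LEMMAS AND PROOFS =====

theorem pv_sum_map_add (f g : Int → Int) (l : List Int) :
    (l.map (fun k => f k + g k)).sum = (l.map f).sum + (l.map g).sum := by
  induction l with
  | nil => simp
  | cons x l ih => simp [ih]; ring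

-- a 0/1 indicator summed over a nodup list picks out membership
theorem pv_sum_indicator (x : Int) :
    ∀ (s : List Int), s.Nodup →
      (s.map (fun k => if k = x then (1 : Int) else 0)).sum = if x ∈ s then 1 else 0 := by
  intro s hnd
  induction s with
  | nil => simp
  | cons y s ih =>
    by_cases hxy : y = x
    · subst hxy
      have hz : (s.map (fun k => if k = y then (1 : Int) else 0)).sum = 0 := by
        apply List.sum_eq_zero
        intro z hz
        rcases List.mem_map.mp hz with ⟨k, hk, rfl⟩
        have hky : k ≠ y := fun e => (List.nodup_cons.mp hnd).1 (e ▸ hk)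
        simp [hky]
      simp [hz]
    · have h2 := ih (List.nodup_cons.mp hnd).2
      have hyx : ¬ x = y := fun e => hxy e.symm
      simp [hxy, h2, hyx]

-- summing arr's counts over the distinct elements of se = summing membership indicators over arr
theorem pv_count_sum (se : List Int) :
    ∀ (arr : List Int),
      ((PySem.Set.ofList se).map (fun s => (PySem.List.count arr s : Int))).sum
        = (arr.map (fun x => if se.contains x then (1 : Int) else 0)).sum := by
  intro arr
  induction arr with
  | nil => simp [PySem.List.count]
  | cons x l ih =>
    have hstep : ∀ s : Int, ((PySem.List.count (x :: l) s : Nat) : Int)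
        = (PySem.List.count l s : Int) + (if s = x then (1 : Int) else 0) := by
      intro s
      by_cases h : s = x
      · subst h; simp [PySem.List.count]
      · have h' : ¬ x = s := fun e => h e.symm
        simp [PySem.List.count, h, h']
    rw [List.map_congr_left (fun s _ => hstep s), pv_sum_map_add, ih,
      pv_sum_indicator x _ (PySem.Set.nodup_ofList se)]
    have hmem : x ∈ PySem.Set.ofList se ↔ se.contains x = true := by
      rw [PySem.Set.mem_ofList]; simp
    simp only [List.map_cons, List.sum_cons]
    by_cases h : se.contains x = true <;> simp [hmem] <;> ring

-- A's fold accumulates the per-element membership weight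
theorem pv_foldl_A (seta setb : List Int) :
    ∀ (l : List Int) (a : Int),
      l.foldl (fun happiness arr_elem =>
        let h1 := if seta.contains arr_elem then happiness + 1 else happiness
        if setb.contains arr_elem then h1 - 1 else h1) a
      = a + (l.map (fun x => if seta.contains x then (1 : Int) else 0)).sum
          - (l.map (fun x => if setb.contains x then (1 : Int) else 0)).sum := by
  intro l
  induction l with
  | nil => simp
  | cons x l ih =>
    intro a
    simp only [List.foldl_cons, List.map_cons, List.sum_cons, ih]
    split_ifs <;> ring

theorem pv_counts_sum (arr se : List Int) :
    ((PySem.Set.ofList se).map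
        (fun s => (arr.foldl (fun d x => d.insert x (d.getD x 0 + 1))
          (PySem.Dict.empty : PySem.Dict Int Int)).getD s 0)).sum
      = (arr.map (fun x => if se.contains x then (1 : Int) else 0)).sum := by
  rw [PySem.Dict.foldl_insert_getD_add_one_eq_counter]
  have h := pv_count_sum se arr
  simpa [PySem.Dict.getD_counter, PySem.List.count] using h

-- ===== VERDICT =====
theorem cal_happiness_spec : Claim_equal_cal_happiness := by
  intro arr seta setb _
  unfold Spec_cal_happiness cal_happiness cal_happiness_alt
  rw [pv_foldl_A]
  show _ = ((PySem.Set.ofList seta).map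
        (fun s => (arr.foldl (fun d x => d.insert x (d.getD x 0 + 1))
          (PySem.Dict.empty : PySem.Dict Int Int)).getD s 0)).sum
      - ((PySem.Set.ofList setb).map
        (fun s => (arr.foldl (fun d x => d.insert x (d.getD x 0 + 1))
          (PySem.Dict.empty : PySem.Dict Int Int)).getD s 0)).sum
  rw [pv_counts_sum, pv_counts_sum]
  ring
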